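-- pv_equiv track=rewrite | github.com/SilvestreLago/FUP | Dicionários/15.py | contem
-- ===== SOURCE A (Python) =====
-- def contem(parte, texto):
--     for i in range(len(parte) - len(texto) + 1):
--         igual = True
--         for j in range(len(texto)):
--             if parte[i + j].lower() != texto[j].lower():
--                 igual = False
--                 break
--         if igual:
--             return True
--     return False
-- ===== SOURCE B (Python) =====
-- def contem(parte, texto):
--     return texto.lower() in parte.lower()
-- ===== Notes on version B (the rewrite author's own statement) =====
-- stated objective: faster
-- what changed: Replaces the hand-written nested index loops (try every start position, compare character by character with per-char .lower()) by lowercasing both strings once and using Python's built-in substring operator 'in'.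
import Mathlib
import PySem

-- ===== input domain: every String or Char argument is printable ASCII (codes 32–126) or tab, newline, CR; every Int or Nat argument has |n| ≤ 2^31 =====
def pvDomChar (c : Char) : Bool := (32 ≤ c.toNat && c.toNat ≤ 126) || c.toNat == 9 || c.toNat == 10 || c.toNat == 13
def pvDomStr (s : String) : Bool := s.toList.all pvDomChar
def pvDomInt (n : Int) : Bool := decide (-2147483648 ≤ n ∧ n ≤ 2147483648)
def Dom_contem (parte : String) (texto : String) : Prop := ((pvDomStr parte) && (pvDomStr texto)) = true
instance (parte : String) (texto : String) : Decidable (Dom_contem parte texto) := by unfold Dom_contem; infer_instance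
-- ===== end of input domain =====

-- B lowercases both strings once and uses the built-in substring test instead of A's
-- hand-written scan over every start position with per-character lowering (objective: faster).

-- ===== PORT A =====
-- inner loop: 'for j in range(len(texto)): if parte[i+j].lower() != texto[j].lower(): igual = False; break'
-- (index i+j is always in range when called from the outer loop, so pyGetD's default is never used)
def contemCheck (p t : List Char) (i j : Nat) : Bool :=
  if j < t.length then
    if PySem.Chars.lowerChar (PySem.List.pyGetD p ((i : Int) + (j : Int)) ' ')
         ≠ PySem.Chars.lowerChar (PySem.List.pyGetD t (j : Int) ' ')
    then false
    else contemCheck p t i (j + 1)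
  else true
termination_by t.length - j

-- outer loop: 'for i in range(len(parte) - len(texto) + 1): … if igual: return True' then 'return False'
def contemLoop (p t : List Char) (n : Int) (i : Nat) : Bool :=
  if (i : Int) < n then
    if contemCheck p t i 0 then true
    else contemLoop p t n (i + 1)
  else false
termination_by (n - (i : Int)).toNat
decreasing_by omega

def contem (parte : String) (texto : String) : Bool :=
  contemLoop parte.toList texto.toList (PySem.Str.len parte - PySem.Str.len texto + 1) 0

-- ===== PORT B =====
def contem_alt (parte : String) (texto : String) : Bool :=
  PySem.Str.isIn (PySem.Str.lower texto) (PySem.Str.lower parte)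

-- ===== PRECONDITION & SPEC =====
def Spec_contem (parte : String) (texto : String) (out : Bool) : Prop := out = contem_alt parte texto
instance (parte : String) (texto : String) (out : Bool) : Decidable (Spec_contem parte texto out) := by unfold Spec_contem; infer_instance

-- ===== CLAIM (what is proved, stated in full; the proofs are below) =====
def Claim_equal_contem : Prop := ∀ (parte : String) (texto : String), Dom_contem parte texto → Spec_contem parte texto (contem parte texto)

-- ===== LEMMAS AND PROOFS =====

-- the inner loop decides 'lowercased texto, from j on, is a prefix of lowercased parte from i+j on'
theorem contemCheck_iff (p t : List Char) (i : Nat) :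
    ∀ (k j : Nat), j + k = t.length → i + t.length ≤ p.length →
      (contemCheck p t i j = true ↔
        (t.drop j).map PySem.Chars.lowerChar <+: (p.drop (i + j)).map PySem.Chars.lowerChar) := by
  intro k
  induction k with
  | zero =>
      intro j hj _
      rw [contemCheck]
      have h1 : ¬ j < t.length := by omega
      have h2 : t.drop j = [] := List.drop_eq_nil_of_le (by omega)
      simp [h1, h2]
  | succ k ih =>
      intro j hj hip
      have hjt : j < t.length := by omega
      have hijp : i + j < p.length := by omega
      rw [contemCheck]
      have hpg : PySem.List.pyGetD p ((i : Int) + (j : Int)) ' ' = p[i + j] := by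
        have : ((i : Int) + (j : Int)) = ((i + j : Nat) : Int) := by push_cast; ring
        rw [this, PySem.List.pyGetD_natCast, List.getD_eq_getElem _ _ hijp]
      have htg : PySem.List.pyGetD t ((j : Nat) : Int) ' ' = t[j] := by
        rw [PySem.List.pyGetD_natCast, List.getD_eq_getElem _ _ hjt]
      rw [hpg, htg]
      rw [List.drop_eq_getElem_cons hjt, List.drop_eq_getElem_cons hijp]
      simp only [hjt, if_true, List.map_cons, List.cons_prefix_cons]
      by_cases hc : PySem.Chars.lowerChar p[i + j] = PySem.Chars.lowerChar t[j]
      · have := ih (j + 1) (by omega) hip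
        simpa [hc, show i + j + 1 = i + (j + 1) by omega] using this
      · simp only [hc, if_true, ne_eq, not_false_iff]
        constructor
        · intro h; exact absurd h (by simp)
        · rintro ⟨h, -⟩; exact absurd h.symm hc

-- the outer loop decides 'some start position k ≥ i (within range) matches'
theorem contemLoop_iff (p t : List Char) (n : Int)
    (hn : n = (p.length : Int) - (t.length : Int) + 1) :
    ∀ (m : Nat) (i : Nat), (n - (i : Int)).toNat = m →
      (contemLoop p t n i = true ↔
        ∃ k : Nat, i ≤ k ∧ (k : Int) < n ∧
          t.map PySem.Chars.lowerChar <+: (p.drop k).map PySem.Chars.lowerChar) := by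
  intro m
  induction m using Nat.strong_induction_on with
  | _ m ih =>
      intro i hm
      rw [contemLoop]
      by_cases hi : (i : Int) < n
      · have hip : i + t.length ≤ p.length := by omega
        have hchk := contemCheck_iff p t i t.length 0 (by omega) hip
        simp only [List.drop_zero, Nat.add_zero] at hchk
        by_cases hc : contemCheck p t i 0 = true
        · simp only [hi, if_true, hc]
          constructor
          · intro _
            exact ⟨i, le_refl i, hi, hchk.mp hc⟩
          · intro _; trivial
        · have hrec := ih ((n - ((i : Int) + 1)).toNat) (by omega) (i + 1) (by push_cast; omega)
          simp only [hi, if_true, hc, if_false, Bool.false_eq_true, hrec]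
          constructor
          · rintro ⟨kk, h1, h2, h3⟩
            exact ⟨kk, by omega, h2, h3⟩
          · rintro ⟨kk, h1, h2, h3⟩
            refine ⟨kk, ?_, h2, h3⟩
            rcases Nat.eq_or_lt_of_le h1 with h | h
            · exact absurd (hchk.mpr (h ▸ h3)) hc
            · omega
      · simp only [hi, if_false]
        constructor
        · intro h; exact absurd h (by simp)
        · rintro ⟨k, h1, h2, _⟩
          exfalso
          have : (i : Int) ≤ (k : Int) := by exact_mod_cast h1
          omega

-- ===== VERDICT (by name: the statement is the Claim_ definition above) =====
theorem contem_spec : Claim_equal_contem := by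
  intro parte texto _
  unfold Spec_contem contem contem_alt
  have hlen : ∀ s : String, PySem.Str.len s = (s.toList.length : Int) := by
    intro s; simp [PySem.Str.len]
  rw [hlen, hlen]
  have hloop := contemLoop_iff parte.toList texto.toList
      ((parte.toList.length : Int) - (texto.toList.length : Int) + 1) rfl
      (((parte.toList.length : Int) - (texto.toList.length : Int) + 1).toNat) 0 (by simp)
  have hin : PySem.Str.isIn (PySem.Str.lower texto) (PySem.Str.lower parte)
      = PySem.Chars.isIn (PySem.Chars.lower texto.toList) (PySem.Chars.lower parte.toList) := by
    simp [PySem.Str.isIn]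
  rw [Bool.eq_iff_iff, hloop, hin, ← PySem.Chars.exists_prefix_drop_iff_isIn]
  have hl : ∀ l : List Char, PySem.Chars.lower l = l.map PySem.Chars.lowerChar := fun _ => rfl
  rw [hl, hl]
  constructor
  · rintro ⟨k, _, _, h3⟩
    refine ⟨k, ?_⟩
    rw [← List.map_drop]
    exact h3
  · rintro ⟨j, hj⟩
    rw [← List.map_drop] at hj
    have hjlen : texto.toList.length ≤ parte.toList.length - j := by
      have h := hj.length_le
      simpa using h
    by_cases h0 : texto.toList.length = 0
    · refine ⟨0, le_refl 0, by omega, ?_⟩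
      have : texto.toList.map PySem.Chars.lowerChar = [] := by
        simp [List.eq_nil_of_length_eq_zero h0]
      simp [this]
    · exact ⟨j, Nat.zero_le j, by omega, hj⟩
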